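-- pv_equiv track=rewrite | github.com/AshwinRamesh/Comp2007 | Lecture_Slides/Week02/august6.py | BFS
-- ===== SOURCE A (Python) =====
-- def BFS(G,s):
--     layers = []
--     current_layer = [s]
--     next_layer = []
--     seen = { u : False for u in G }
--     seen[s] = True
--     while len(current_layer) > 0:
--         layers.append(current_layer)
--         for u in current_layer:
--             for v in G[u]:
--                 if not seen[v]:
--                     next_layer.append(v)
--                     seen[v] = True
--         current_layer = next_layer
--         next_layer = []
--
--     return layers
-- ===== SOURCE B (Python) =====
-- def BFS(G, s):
--     # Single FIFO-queue BFS recording a distance for every discovered vertex,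
--     # then one grouping pass building layer d as the discovered vertices at distance d.
--     dist = {s: 0}
--     order = [s]
--     pending = [s]
--     while pending:
--         u = pending.pop(0)
--         for v in G[u]:
--             if v not in dist:
--                 dist[v] = dist[u] + 1
--                 order.append(v)
--                 pending.append(v)
--     depth = dist[order[-1]]
--     return [[u for u in order if dist[u] == d] for d in range(depth + 1)]
-- ===== Notes on version B (the rewrite author's own statement) =====
-- stated objective: alternative
-- what changed: Replaces the two-buffer layer-by-layer loop (current_layer/next_layer swapped each round) by a single FIFO-queue BFS that records each vertex's distance in a dict, followed by a separate grouping pass that builds layer d by filtering the discovery order for vertices at distance d.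
import Mathlib
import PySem

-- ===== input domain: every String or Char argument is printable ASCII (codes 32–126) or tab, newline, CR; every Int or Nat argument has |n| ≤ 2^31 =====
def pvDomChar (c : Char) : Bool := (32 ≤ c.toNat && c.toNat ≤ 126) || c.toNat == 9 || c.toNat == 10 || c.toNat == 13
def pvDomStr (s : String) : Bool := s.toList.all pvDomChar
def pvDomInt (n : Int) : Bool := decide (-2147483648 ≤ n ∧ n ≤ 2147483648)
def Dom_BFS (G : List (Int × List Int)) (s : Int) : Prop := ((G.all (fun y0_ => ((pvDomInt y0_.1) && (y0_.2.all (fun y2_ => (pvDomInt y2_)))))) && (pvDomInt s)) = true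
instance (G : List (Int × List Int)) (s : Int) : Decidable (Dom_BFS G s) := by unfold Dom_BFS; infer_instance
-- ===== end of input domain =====

-- B replaces A's two-buffer layer-by-layer loop by a single FIFO-queue BFS with a
-- distance map plus a grouping pass filtering the discovery order per distance
-- (objective: alternative decomposition). Neither version mutates its arguments.

-- ===== PORT A =====

-- shape of A's seen-updates, used by the termination measure of A's while loop
def insTrue (Δ : List Int) (seen : PySem.Dict Int Bool) : PySem.Dict Int Bool :=
  Δ.foldl (fun d v => d.insert v true) seen

lemma getD_insTrue (Δ : List Int) (seen : PySem.Dict Int Bool) (x : Int) :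
    (insTrue Δ seen).getD x false = (if x ∈ Δ then true else seen.getD x false) := by
  induction Δ generalizing seen with
  | nil => simp [insTrue]
  | cons v Δ ih =>
    simp only [insTrue, List.foldl_cons] at *
    rw [ih]
    by_cases hx : x = v
    · subst hx; simp
    · simp [PySem.Dict.getD_insert, hx, List.mem_cons]

-- the inner 'for v in G[u]' of A: flip unseen vertices and append them to next_layer
def stepA (st : PySem.Dict Int Bool × List Int) (v : Int) : PySem.Dict Int Bool × List Int :=
  if st.1.getD v false then st else (st.1.insert v true, st.2 ++ [v])

-- the body of A's 'for u in current_layer' loop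
def bfsInner (adj : PySem.Dict Int (List Int)) (st : PySem.Dict Int Bool × List Int) (u : Int) :
    PySem.Dict Int Bool × List Int :=
  (adj.getD u []).foldl stepA st

lemma innerA_char (vs : List Int) (seen : PySem.Dict Int Bool) (nx : List Int) :
    ∃ Δ, vs.foldl stepA (seen, nx) = (insTrue Δ seen, nx ++ Δ) ∧
      ∀ v ∈ Δ, seen.getD v false = false ∧ v ∈ vs := by
  induction vs generalizing seen nx with
  | nil => exact ⟨[], by simp [insTrue], by simp⟩
  | cons v vs ih =>
    simp only [List.foldl_cons]
    by_cases hv : seen.getD v false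
    · obtain ⟨Δ, h1, h2⟩ := ih seen nx
      exact ⟨Δ, by simpa [stepA, hv] using h1, fun w hw => ⟨(h2 w hw).1, List.mem_cons_of_mem _ (h2 w hw).2⟩⟩
    · obtain ⟨Δ, h1, h2⟩ := ih (seen.insert v true) (nx ++ [v])
      refine ⟨v :: Δ, ?_, ?_⟩
      · simp only [stepA, hv]
        simpa [insTrue, List.append_assoc] using h1
      · intro w hw
        rcases List.mem_cons.mp hw with rfl | hw'
        · exact ⟨by simpa using hv, List.mem_cons_self⟩
        · obtain ⟨hw1, hw2⟩ := h2 w hw'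
          refine ⟨?_, List.mem_cons_of_mem _ hw2⟩
          by_cases hwv : w = v
          · subst hwv; simp at hw1
          · simpa [PySem.Dict.getD_insert, hwv] using hw1

lemma layerA_char (adj : PySem.Dict Int (List Int)) (cur : List Int) (seen : PySem.Dict Int Bool)
    (nx : List Int) :
    ∃ Δ, cur.foldl (bfsInner adj) (seen, nx) = (insTrue Δ seen, nx ++ Δ) ∧
      ∀ v ∈ Δ, seen.getD v false = false ∧ ∃ u, v ∈ adj.getD u [] := by
  induction cur generalizing seen nx with
  | nil => exact ⟨[], by simp [insTrue], by simp⟩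
  | cons u cur ih =>
    simp only [List.foldl_cons]
    obtain ⟨Δ1, h1, h2⟩ := innerA_char (adj.getD u []) seen nx
    obtain ⟨Δ2, h3, h4⟩ := ih (insTrue Δ1 seen) (nx ++ Δ1)
    refine ⟨Δ1 ++ Δ2, ?_, ?_⟩
    · rw [bfsInner, h1, h3]
      simp [insTrue, List.foldl_append, List.append_assoc]
    · intro v hv
      rcases List.mem_append.mp hv with hv1 | hv2
      · exact ⟨(h2 v hv1).1, u, (h2 v hv1).2⟩
      · obtain ⟨hs, hu⟩ := h4 v hv2
        rw [getD_insTrue] at hs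
        constructor
        · by_cases hm : v ∈ Δ1 <;> simp [hm] at hs <;> simp [hs]
        · exact hu

lemma mem_values_flatten (adj : PySem.Dict Int (List Int)) (u v : Int)
    (h : v ∈ adj.getD u []) : v ∈ adj.values.flatten := by
  cases hg : adj.get? u with
  | none => rw [PySem.Dict.getD_of_get?_eq_none adj [] hg] at h; simp at h
  | some l =>
    rw [PySem.Dict.getD_of_get?_eq_some adj [] hg] at h
    have hi := PySem.Dict.mem_items_of_get?_eq_some adj hg
    have : l ∈ adj.values := by
      have : l ∈ adj.items.map (·.2) := List.mem_map.mpr ⟨(u, l), hi, rfl⟩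
      simpa [PySem.Dict.values] using this
    exact List.mem_flatten.mpr ⟨l, this, h⟩

def Useen (adj : PySem.Dict Int (List Int)) (seen : PySem.Dict Int Bool) : Nat :=
  (adj.values.flatten.toFinset.filter (fun v => seen.getD v false = false)).card

lemma Useen_insTrue_lt (adj : PySem.Dict Int (List Int)) (seen : PySem.Dict Int Bool)
    (Δ : List Int) (hne : Δ ≠ [])
    (h : ∀ v ∈ Δ, seen.getD v false = false ∧ ∃ u, v ∈ adj.getD u []) :
    Useen adj (insTrue Δ seen) < Useen adj seen := by
  apply Finset.card_lt_card
  constructor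
  · intro x hx
    simp only [Finset.mem_filter] at hx ⊢
    refine ⟨hx.1, ?_⟩
    have := hx.2
    rw [getD_insTrue] at this
    by_cases hm : x ∈ Δ <;> simp [hm] at this <;> simp [this]
  · intro hsub
    obtain ⟨v, hv⟩ := List.exists_mem_of_ne_nil Δ hne
    obtain ⟨hs, u, hu⟩ := h v hv
    have hvin : v ∈ adj.values.flatten.toFinset.filter (fun v => seen.getD v false = false) := by
      simp only [Finset.mem_filter, List.mem_toFinset]
      exact ⟨mem_values_flatten adj u v hu, hs⟩
    have := hsub hvin
    simp only [Finset.mem_filter] at this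
    rw [getD_insTrue, if_pos hv] at this
    exact absurd this.2 (by simp)

-- A's while loop: one recursive step per layer
def bfsLoop (adj : PySem.Dict Int (List Int)) (seen : PySem.Dict Int Bool) (cur : List Int) :
    List (List Int) :=
  if h : cur = [] then []
  else
    let st := cur.foldl (bfsInner adj) (seen, [])
    cur :: bfsLoop adj st.1 st.2
termination_by (Useen adj seen, cur.length)
decreasing_by
  simp only [List.foldl_attach]
  obtain ⟨Δ, h1, h2⟩ := layerA_char adj cur seen []
  rw [h1]
  by_cases hΔ : Δ = []
  · subst hΔ
    simp only [insTrue, List.foldl_nil, List.nil_append]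
    exact Prod.Lex.right _ (by simp [List.length_pos_iff, h])
  · exact Prod.Lex.left _ _ (Useen_insTrue_lt adj seen Δ hΔ h2)

def BFS (G : List (Int × List Int)) (s : Int) : List (List Int) :=
  let adj := PySem.Dict.ofList G
  -- seen = { u : False for u in G }; seen[s] = True
  let seen := (G.foldl (fun d p => d.insert p.1 false) PySem.Dict.empty).insert s true
  bfsLoop adj seen [s]

-- ===== PORT B =====

-- 'for v in G[u]': first-seen vertices get a distance and are appended to order and pending
def stepB (u : Int) (st : List Int × List Int × PySem.Dict Int Int) (v : Int) :
    List Int × List Int × PySem.Dict Int Int :=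
  if (st.2.2.get? v).isSome then st
  else (st.1 ++ [v], st.2.1 ++ [v], st.2.2.insert v (st.2.2.getD u 0 + 1))

-- 'while pending: u = pending.pop(0); …'.  The Nat fuel is ONLY a totality guard:
-- one unit per possible pop (the queue receives s plus at most every stored neighbour
-- once), so the 0-fuel branch is never reached at the call below.
def bfsQueue (adj : PySem.Dict Int (List Int)) :
    Nat → List Int → List Int → PySem.Dict Int Int → List Int × PySem.Dict Int Int
  | 0, order, _, dist => (order, dist)
  | fuel + 1, order, pending, dist =>
    match pending with
    | [] => (order, dist)
    | u :: rest =>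
      let st := (adj.getD u []).foldl (stepB u) (order, rest, dist)
      bfsQueue adj fuel st.1 st.2.1 st.2.2

def BFS_alt (G : List (Int × List Int)) (s : Int) : List (List Int) :=
  let adj := PySem.Dict.ofList G
  let st := bfsQueue adj (adj.values.flatten.length + 1) [s] [s]
    (PySem.Dict.empty.insert s 0)
  -- depth = dist[order[-1]]; order starts with s, so it is nonempty and its last
  -- element is a key of dist: both getD defaults are unreachable (exact here)
  let depth := st.2.getD (PySem.List.pyGetD st.1 (-1) 0) 0
  -- [[u for u in order if dist[u] == d] for d in range(depth + 1)]
  (PySem.List.pyRange 0 (depth + 1) 1).map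
    (fun d => st.1.filter (fun u => st.2.getD u 0 == d))

-- ===== PRECONDITION & SPEC =====

-- Pre_ holds exactly where the Python A returns normally (no KeyError): s is a key of G and
-- every vertex reachable from s along stored neighbour lists is a key of G.  The reachable set
-- is a bounded closure: G.length + 1 expansions suffice, as each step before the fixpoint adds
-- a vertex.
def reachStep (adj : PySem.Dict Int (List Int)) (S : List Int) : List Int :=
  PySem.Set.update S (S.flatMap (fun u => adj.getD u []))

def reachSet (G : List (Int × List Int)) (s : Int) : List Int :=
  (reachStep (PySem.Dict.ofList G))^[G.length + 1] [s]

def Pre_BFS (G : List (Int × List Int)) (s : Int) : Prop :=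
  s ∈ G.map Prod.fst ∧ ∀ v ∈ reachSet G s, v ∈ G.map Prod.fst

instance (G : List (Int × List Int)) (s : Int) : Decidable (Pre_BFS G s) := by
  unfold Pre_BFS; infer_instance

def pvWitness_BFS : (List (Int × List Int)) × Int := ([(0, [1, 2]), (1, [0]), (2, [])], 0)

def Spec_BFS (G : List (Int × List Int)) (s : Int) (out : List (List Int)) : Prop := out = BFS_alt G s
instance (G : List (Int × List Int)) (s : Int) (out : List (List Int)) : Decidable (Spec_BFS G s out) := by unfold Spec_BFS; infer_instance

-- ===== CLAIM (what is proved, stated in full; the proofs are below) =====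
def Claim_equal_BFS : Prop := ∀ (G : List (Int × List Int)) (s : Int), Dom_BFS G s → Pre_BFS G s → Spec_BFS G s (BFS G s)

-- ===== LEMMAS AND PROOFS =====

def insVal (c : Int) (Δ : List Int) (dist : PySem.Dict Int Int) : PySem.Dict Int Int :=
  Δ.foldl (fun d v => d.insert v c) dist

lemma get?_insVal (c : Int) (Δ : List Int) (dist : PySem.Dict Int Int) (x : Int) :
    (insVal c Δ dist).get? x = (if x ∈ Δ then some c else dist.get? x) := by
  induction Δ generalizing dist with
  | nil => simp [insVal]
  | cons v Δ ih =>
    simp only [insVal, List.foldl_cons] at *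
    rw [ih]
    by_cases hx : x = v
    · subst hx; simp
    · simp [PySem.Dict.get?_insert, hx, List.mem_cons]

lemma contains_insVal (c : Int) (Δ : List Int) (dist : PySem.Dict Int Int) (x : Int) :
    (insVal c Δ dist).contains x = (decide (x ∈ Δ) || dist.contains x) := by
  rw [PySem.Dict.contains_eq_isSome_get?, PySem.Dict.contains_eq_isSome_get?, get?_insVal]
  by_cases hx : x ∈ Δ <;> simp [hx]

def Udist (adj : PySem.Dict Int (List Int)) (dist : PySem.Dict Int Int) : Nat :=
  (adj.values.flatten.toFinset.filter (fun v => dist.contains v = false)).card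

lemma Udist_insVal_le (adj : PySem.Dict Int (List Int)) (dist : PySem.Dict Int Int)
    (c : Int) (Δ : List Int) (hnd : Δ.Nodup)
    (h : ∀ v ∈ Δ, dist.contains v = false ∧ ∃ u, v ∈ adj.getD u []) :
    Udist adj (insVal c Δ dist) + Δ.length ≤ Udist adj dist := by
  have hset : adj.values.flatten.toFinset.filter (fun v => (insVal c Δ dist).contains v = false)
      = (adj.values.flatten.toFinset.filter (fun v => dist.contains v = false)) \ Δ.toFinset := by
    ext x
    simp only [Finset.mem_filter, Finset.mem_sdiff, List.mem_toFinset, contains_insVal,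
      Bool.or_eq_false_iff, decide_eq_false_iff_not]
    tauto
  have hsub : Δ.toFinset ⊆ adj.values.flatten.toFinset.filter (fun v => dist.contains v = false) := by
    intro x hx
    rw [List.mem_toFinset] at hx
    obtain ⟨hc, u, hu⟩ := h x hx
    simp only [Finset.mem_filter, List.mem_toFinset]
    exact ⟨mem_values_flatten adj u x hu, hc⟩
  have hcard : Δ.toFinset.card = Δ.length := by
    rw [List.toFinset_card_of_nodup hnd]
  unfold Udist
  rw [hset, Finset.card_sdiff, Finset.inter_eq_left.mpr hsub, hcard]
  have := Finset.card_le_card hsub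
  omega

lemma bfsLoop_nil (adj : PySem.Dict Int (List Int)) (seen : PySem.Dict Int Bool) :
    bfsLoop adj seen [] = [] := by
  rw [bfsLoop]; simp

lemma bfsLoop_cons (adj : PySem.Dict Int (List Int)) (seen : PySem.Dict Int Bool)
    (cur : List Int) (h : cur ≠ []) :
    bfsLoop adj seen cur =
      cur :: bfsLoop adj (cur.foldl (bfsInner adj) (seen, [])).1
        (cur.foldl (bfsInner adj) (seen, [])).2 := by
  rw [bfsLoop]; simp [h]

lemma bfsQueue_empty (adj : PySem.Dict Int (List Int)) (fuel : Nat) (order : List Int)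
    (dist : PySem.Dict Int Int) : bfsQueue adj fuel order [] dist = (order, dist) := by
  cases fuel <;> rfl

lemma insTrue_append (a b : List Int) (seen : PySem.Dict Int Bool) :
    insTrue (a ++ b) seen = insTrue b (insTrue a seen) := by
  simp [insTrue, List.foldl_append]

lemma insVal_append (c : Int) (a b : List Int) (dist : PySem.Dict Int Int) :
    insVal c (a ++ b) dist = insVal c b (insVal c a dist) := by
  simp [insVal, List.foldl_append]

-- the joint characterisation of one 'for v in G[u]' pass of A and of B
lemma inner_spec (vs : List Int) (seen : PySem.Dict Int Bool) (nx : List Int)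
    (ord pend : List Int) (dist : PySem.Dict Int Int) (w c : Int)
    (hrel : ∀ v, seen.getD v false = dist.contains v)
    (hw : dist.contains w = true)
    (hc : c = dist.getD w 0 + 1) :
    ∃ Δ, vs.foldl stepA (seen, nx) = (insTrue Δ seen, nx ++ Δ) ∧
      vs.foldl (stepB w) (ord, pend, dist) = (ord ++ Δ, pend ++ Δ, insVal c Δ dist) ∧
      Δ.Nodup ∧
      ∀ v ∈ Δ, dist.contains v = false ∧ v ∈ vs := by
  induction vs generalizing seen nx ord pend dist with
  | nil => exact ⟨[], by simp [insTrue], by simp [insVal], by simp, by simp⟩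
  | cons v vs ih =>
    simp only [List.foldl_cons]
    by_cases hv : dist.contains v = true
    · have hA : stepA (seen, nx) v = (seen, nx) := by
        simp [stepA, (hrel v).trans hv]
      have hB : stepB w (ord, pend, dist) v = (ord, pend, dist) := by
        rw [PySem.Dict.contains_eq_isSome_get?] at hv
        simp [stepB, hv]
      rw [hA, hB]
      obtain ⟨Δ, h1, h2, hnd, h3⟩ := ih seen nx ord pend dist hrel hw hc
      exact ⟨Δ, h1, h2, hnd, fun x hx => ⟨(h3 x hx).1, List.mem_cons_of_mem _ (h3 x hx).2⟩⟩
    · have hvf : dist.contains v = false := by simpa using hv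
      have hseenv : seen.getD v false = false := (hrel v).trans hvf
      have hvw : v ≠ w := fun h => by rw [h, hw] at hvf; cases hvf
      have hA : stepA (seen, nx) v = (seen.insert v true, nx ++ [v]) := by
        simp [stepA, hseenv]
      have hB : stepB w (ord, pend, dist) v = (ord ++ [v], pend ++ [v], dist.insert v c) := by
        rw [PySem.Dict.contains_eq_isSome_get?] at hvf
        simp [stepB, hvf, hc]
      rw [hA, hB]
      have hrel' : ∀ x, (seen.insert v true).getD x false = (dist.insert v c).contains x := by
        intro x
        rw [PySem.Dict.getD_insert, PySem.Dict.contains_insert]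
        by_cases hx : x = v
        · subst hx; simp
        · have hb : (x == v) = false := by simpa using hx
          simp [hx, hb, hrel x]
      have hw' : (dist.insert v c).contains w = true := by
        rw [PySem.Dict.contains_insert, hw]; simp
      have hc' : c = (dist.insert v c).getD w 0 + 1 := by
        rw [PySem.Dict.getD_insert, if_neg (fun h => hvw h.symm), ← hc]
      obtain ⟨Δ, h1, h2, hnd, h3⟩ := ih (seen.insert v true) (nx ++ [v]) (ord ++ [v])
        (pend ++ [v]) (dist.insert v c) hrel' hw' hc'
      have hnotΔ : v ∉ Δ := by
        intro hmem
        have := (h3 v hmem).1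
        rw [PySem.Dict.contains_insert] at this
        simp at this
      refine ⟨v :: Δ, ?_, ?_, ?_, ?_⟩
      · simpa [insTrue, List.append_assoc] using h1
      · simpa [insVal, List.append_assoc] using h2
      · exact List.nodup_cons.mpr ⟨hnotΔ, hnd⟩
      · intro x hx
        rcases List.mem_cons.mp hx with rfl | hx'
        · exact ⟨hvf, List.mem_cons_self⟩
        · obtain ⟨hcx, hmx⟩ := h3 x hx'
          rw [PySem.Dict.contains_insert] at hcx
          simp only [Bool.or_eq_false_iff] at hcx
          exact ⟨hcx.2, List.mem_cons_of_mem _ hmx⟩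

-- scanning one whole layer: A's fold over the layer matches B's queue loop popping
-- exactly the corresponding queue segment (one fuel unit per pop)
lemma scan (adj : PySem.Dict Int (List Int)) (cur : List Int) :
    ∀ (seen : PySem.Dict Int Bool) (nx : List Int) (dist : PySem.Dict Int Int)
      (ord pend : List Int) (d : Int) (fuel : Nat),
    (∀ v, seen.getD v false = dist.contains v) →
    (∀ u ∈ cur, dist.get? u = some d) →
    ∃ Δ, cur.foldl (bfsInner adj) (seen, nx) = (insTrue Δ seen, nx ++ Δ) ∧
      bfsQueue adj (fuel + cur.length) ord (cur ++ pend) dist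
        = bfsQueue adj fuel (ord ++ Δ) (pend ++ Δ) (insVal (d + 1) Δ dist) ∧
      Δ.Nodup ∧
      ∀ v ∈ Δ, dist.contains v = false ∧ ∃ u, v ∈ adj.getD u [] := by
  induction cur with
  | nil =>
    intro seen nx dist ord pend d fuel _ _
    exact ⟨[], by simp [insTrue], by simp [insVal], by simp, by simp⟩
  | cons u cur ih =>
    intro seen nx dist ord pend d fuel hrel hd
    have hu : dist.get? u = some d := hd u List.mem_cons_self
    have hcont : dist.contains u = true := by
      rw [PySem.Dict.contains_eq_isSome_get?, hu]; rfl
    obtain ⟨Δ1, hA1, hB1, hnd1, hm1⟩ := inner_spec (adj.getD u []) seen nx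
      ord (cur ++ pend) dist u (d + 1) hrel hcont
      (by rw [PySem.Dict.getD_of_get?_eq_some dist 0 hu])
    have hrel1 : ∀ v, (insTrue Δ1 seen).getD v false = (insVal (d + 1) Δ1 dist).contains v := by
      intro v
      rw [getD_insTrue, contains_insVal]
      by_cases hv : v ∈ Δ1
      · simp [hv]
      · simp [hv, hrel v]
    have hd1 : ∀ u' ∈ cur, (insVal (d + 1) Δ1 dist).get? u' = some d := by
      intro u' hu'
      have h' := hd u' (List.mem_cons_of_mem _ hu')
      have hnot : u' ∉ Δ1 := by
        intro hmem
        have := (hm1 u' hmem).1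
        rw [PySem.Dict.contains_eq_isSome_get?, h'] at this
        cases this
      rw [get?_insVal, if_neg hnot, h']
    obtain ⟨Δ2, hA2, hB2, hnd2, hm2⟩ := ih (insTrue Δ1 seen) (nx ++ Δ1)
      (insVal (d + 1) Δ1 dist) (ord ++ Δ1) (pend ++ Δ1) d fuel hrel1 hd1
    have hdisj : ∀ x ∈ Δ2, x ∉ Δ1 := by
      intro x hx hmem
      have := (hm2 x hx).1
      rw [contains_insVal] at this
      simp [hmem] at this
    refine ⟨Δ1 ++ Δ2, ?_, ?_, ?_, ?_⟩
    · simp only [List.foldl_cons, bfsInner, hA1]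
      rw [hA2, insTrue_append, List.append_assoc]
    · -- B side: one pop (one fuel unit), then the rest of the layer
      have hlen : fuel + (u :: cur).length = (fuel + cur.length) + 1 := by simp; omega
      rw [hlen]
      show bfsQueue adj ((fuel + cur.length) + 1) ord (u :: (cur ++ pend)) dist = _
      rw [bfsQueue]
      simp only [hB1]
      have hq : (cur ++ pend) ++ Δ1 = cur ++ (pend ++ Δ1) := by simp [List.append_assoc]
      rw [hq, hB2, insVal_append]
      simp [List.append_assoc]
    · exact List.Nodup.append hnd1 hnd2 (List.disjoint_right.mpr hdisj)
    · intro v hv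
      rcases List.mem_append.mp hv with hv1 | hv2
      · exact ⟨(hm1 v hv1).1, u, (hm1 v hv1).2⟩
      · obtain ⟨hc2, hex⟩ := hm2 v hv2
        rw [contains_insVal] at hc2
        simp only [Bool.or_eq_false_iff] at hc2
        exact ⟨hc2.2, hex⟩

-- the main correspondence: B's queue loop emits A's layers flattened, the distance map
-- labels every vertex with its layer index, and the last emitted vertex carries the
-- deepest label
lemma main (adj : PySem.Dict Int (List Int)) (dist : PySem.Dict Int Int)
    (seen : PySem.Dict Int Bool) (cur ord : List Int) (d : Int) (fuel : Nat)
    (hrel : ∀ v, seen.getD v false = dist.contains v)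
    (hd : ∀ u ∈ cur, dist.get? u = some d)
    (hfuel : cur.length + Udist adj dist ≤ fuel) :
    ∃ distF rest,
      bfsQueue adj fuel ord cur dist = (ord ++ rest, distF) ∧
      cur ++ rest = (bfsLoop adj seen cur).flatten ∧
      (∀ x, dist.contains x = true → distF.get? x = dist.get? x) ∧
      (∀ i (hi : i < (bfsLoop adj seen cur).length), ∀ u ∈ (bfsLoop adj seen cur)[i],
        distF.getD u 0 = d + i) ∧
      (∀ u, (cur ++ rest).getLast? = some u → cur ≠ [] →
        distF.getD u 0 + 1 = d + (bfsLoop adj seen cur).length) := by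
  by_cases hcur : cur = []
  · subst hcur
    refine ⟨dist, [], ?_, by simp [bfsLoop_nil], fun _ _ => rfl, ?_, ?_⟩
    · rw [bfsQueue_empty]; simp
    · intro i hi; simp [bfsLoop_nil] at hi
    · intro u _ hne; exact absurd rfl hne
  · obtain ⟨Δ, hA, hB, hnd, hm⟩ := scan adj cur seen [] dist ord [] d (fuel - cur.length)
      hrel hd
    simp only [List.append_nil, List.nil_append] at hA hB
    have hflen : fuel - cur.length + cur.length = fuel := by omega
    rw [hflen] at hB
    have hrest : bfsLoop adj seen cur = cur :: bfsLoop adj (insTrue Δ seen) Δ := by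
      rw [bfsLoop_cons adj seen cur hcur, hA]
    have hUle := Udist_insVal_le adj dist (d + 1) Δ hnd hm
    by_cases hΔ : Δ = []
    · subst hΔ
      have hlayers : bfsLoop adj seen cur = [cur] := by
        rw [hrest, bfsLoop_nil]
      have hstop : bfsQueue adj fuel ord cur dist = (ord, dist) := by
        rw [hB]
        simp only [insVal, List.foldl_nil, List.append_nil]
        exact bfsQueue_empty adj _ _ _
      refine ⟨dist, [], by rw [hstop]; simp, by simp [hlayers], fun _ _ => rfl, ?_, ?_⟩
      · intro i hi u hu
        simp only [hlayers] at hi hu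
        simp only [List.length_singleton] at hi
        interval_cases i
        simp only [List.getElem_cons_zero] at hu
        rw [PySem.Dict.getD_eq_get?_getD, hd u hu]
        simp
      · intro u hlast _
        simp only [List.append_nil] at hlast
        have hu : u ∈ cur := List.mem_of_getLast? hlast
        rw [PySem.Dict.getD_eq_get?_getD, hd u hu, hlayers]
        simp
    · have hrel1 : ∀ v, (insTrue Δ seen).getD v false = (insVal (d + 1) Δ dist).contains v := by
        intro v
        rw [getD_insTrue, contains_insVal]
        by_cases hv : v ∈ Δ
        · simp [hv]
        · simp [hv, hrel v]
      have hd1 : ∀ u ∈ Δ, (insVal (d + 1) Δ dist).get? u = some (d + 1) := by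
        intro u hu
        rw [get?_insVal, if_pos hu]
      have hΔpos : 0 < Δ.length := List.length_pos_iff.mpr hΔ
      have hfuel1 : Δ.length + Udist adj (insVal (d + 1) Δ dist) ≤ fuel - cur.length := by
        omega
      obtain ⟨distF, rest', h1, h2, hpres', hlab', hlast'⟩ := main adj (insVal (d + 1) Δ dist)
        (insTrue Δ seen) Δ (ord ++ Δ) (d + 1) (fuel - cur.length) hrel1 hd1 hfuel1
      have hnotΔ : ∀ x, dist.contains x = true → x ∉ Δ := by
        intro x hx hmem
        rw [(hm x hmem).1] at hx
        cases hx
      have hpres : ∀ x, dist.contains x = true → distF.get? x = dist.get? x := by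
        intro x hx
        have hx1 : (insVal (d + 1) Δ dist).contains x = true := by
          rw [contains_insVal, hx]; simp
        rw [hpres' x hx1, get?_insVal, if_neg (hnotΔ x hx)]
      refine ⟨distF, Δ ++ rest', ?_, ?_, hpres, ?_, ?_⟩
      · rw [hB, h1]; simp [List.append_assoc]
      · rw [hrest]
        simp only [List.flatten_cons, ← h2]
      · intro i hi u hu
        simp only [hrest] at hi hu ⊢
        cases i with
        | zero =>
          simp only [List.getElem_cons_zero] at hu
          have hcu : dist.contains u = true := by
            rw [PySem.Dict.contains_eq_isSome_get?, hd u hu]; rfl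
          rw [PySem.Dict.getD_eq_get?_getD, hpres u hcu, hd u hu]
          simp
        | succ j =>
          simp only [List.getElem_cons_succ] at hu
          simp only [List.length_cons] at hi
          have := hlab' j (by omega) u hu
          rw [this]
          push_cast
          ring
      · intro u hlast _
        have hne' : Δ ++ rest' ≠ [] := by
          intro hcon
          exact hΔ (List.append_eq_nil_iff.mp hcon).1
        rw [List.getLast?_append_of_ne_nil cur hne'] at hlast
        have := hlast' u hlast hΔ
        rw [hrest]
        simp only [List.length_cons]
        push_cast at this ⊢
        omega
termination_by Udist adj dist
decreasing_by
  have : 0 < Δ.length := List.length_pos_iff.mpr hΔ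
  omega

-- every vertex of the flattened layers carries some label base + i, i < number of layers
lemma label_mem_flatten (distF : PySem.Dict Int Int) (Ls : List (List Int)) (base : Int)
    (hlab : ∀ i (hi : i < Ls.length), ∀ u ∈ Ls[i], distF.getD u 0 = base + i) :
    ∀ u ∈ Ls.flatten, ∃ i : Nat, i < Ls.length ∧ distF.getD u 0 = base + i := by
  intro u hu
  obtain ⟨l, hl, hul⟩ := List.mem_flatten.mp hu
  obtain ⟨i, hi, rfl⟩ := List.mem_iff_getElem.mp hl
  exact ⟨i, hi, hlab i hi u hul⟩

-- filtering the flattened layers by label base + i recovers layer i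
lemma filter_label (distF : PySem.Dict Int Int) :
    ∀ (Ls : List (List Int)) (base : Int) (i : Nat)
    (_ : ∀ j (hj : j < Ls.length), ∀ u ∈ Ls[j], distF.getD u 0 = base + j)
    (hi : i < Ls.length),
    Ls.flatten.filter (fun u => distF.getD u 0 == base + i) = Ls[i] := by
  intro Ls
  induction Ls with
  | nil => intro base i _ hi; simp at hi
  | cons L Ls ih =>
    intro base i hlab hi
    have hlab' : ∀ j (hj : j < Ls.length), ∀ u ∈ Ls[j], distF.getD u 0 = (base + 1) + j := by
      intro j hj u hu
      have := hlab (j + 1) (by simpa using hj) u (by simpa using hu)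
      rw [this]; push_cast; ring
    simp only [List.flatten_cons, List.filter_append]
    cases i with
    | zero =>
      have hL : L.filter (fun u => distF.getD u 0 == base + (0 : Nat)) = L := by
        apply List.filter_eq_self.mpr
        intro u hu
        have := hlab 0 (by simp) u (by simpa using hu)
        simp [this]
      have hrest : Ls.flatten.filter (fun u => distF.getD u 0 == base + (0 : Nat)) = [] := by
        apply List.filter_eq_nil_iff.mpr
        intro u hu
        obtain ⟨j, hj, hju⟩ := label_mem_flatten distF Ls (base + 1) hlab' u hu
        rw [hju]
        simp only [beq_iff_eq]
        push_cast
        omega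
      rw [hL, hrest]
      simp
    | succ j =>
      have hL : L.filter (fun u => distF.getD u 0 == base + (j + 1 : Nat)) = [] := by
        apply List.filter_eq_nil_iff.mpr
        intro u hu
        have h0 := hlab 0 (by simp) u (by simpa using hu)
        rw [h0]
        simp only [beq_iff_eq]
        push_cast
        omega
      have heq : (fun u => distF.getD u 0 == base + (j + 1 : Nat))
          = (fun u => distF.getD u 0 == (base + 1) + (j : Nat)) := by
        funext u
        have : base + ((j : Int) + 1) = (base + 1) + (j : Int) := by ring
        push_cast
        rw [this]
      rw [hL]
      simp only [heq]
      rw [ih (base + 1) j hlab' (by simpa using hi)]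
      simp

-- all values of '{ u : False for u in G }' are false (looked up with default false)
lemma seen0_false (G : List (Int × List Int)) (d : PySem.Dict Int Bool)
    (h : ∀ v, d.getD v false = false) :
    ∀ v, (G.foldl (fun d p => d.insert p.1 false) d).getD v false = false := by
  induction G generalizing d with
  | nil => exact h
  | cons p G ih =>
    simp only [List.foldl_cons]
    refine ih _ ?_
    intro v
    rw [PySem.Dict.getD_insert]
    by_cases hv : v = p.1
    · simp [hv]
    · simp [hv, h v]

-- ===== VERDICT (by name: the statement is the Claim_ definition above) =====
theorem BFS_spec : Claim_equal_BFS := by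
  intro G s _ _
  unfold Spec_BFS BFS BFS_alt
  dsimp only
  set adj := PySem.Dict.ofList G with hadj
  have hrel : ∀ v, ((G.foldl (fun d p => d.insert p.1 false) PySem.Dict.empty).insert s true).getD v false
      = ((PySem.Dict.empty : PySem.Dict Int Int).insert s 0).contains v := by
    intro v
    rw [PySem.Dict.getD_insert, PySem.Dict.contains_insert]
    by_cases hv : v = s
    · simp [hv]
    · have hb : (v == s) = false := by simpa using hv
      simp [hv, hb, seen0_false G PySem.Dict.empty (fun v => by simp) v]
  have hd : ∀ u ∈ [s], ((PySem.Dict.empty : PySem.Dict Int Int).insert s 0).get? u = some 0 := by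
    intro u hu
    rw [List.mem_singleton] at hu
    subst hu
    exact PySem.Dict.get?_insert_self _ _ _
  have hfuel : ([s] : List Int).length + Udist adj ((PySem.Dict.empty : PySem.Dict Int Int).insert s 0)
      ≤ adj.values.flatten.length + 1 := by
    have h1 : Udist adj ((PySem.Dict.empty : PySem.Dict Int Int).insert s 0)
        ≤ adj.values.flatten.toFinset.card := Finset.card_filter_le _ _
    have h2 := List.toFinset_card_le adj.values.flatten
    simp only [List.length_singleton]
    omega
  obtain ⟨distF, rest, h1, h2, _, hlab, hlast⟩ := main adj
    ((PySem.Dict.empty : PySem.Dict Int Int).insert s 0)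
    ((G.foldl (fun d p => d.insert p.1 false) PySem.Dict.empty).insert s true)
    [s] [s] 0 (adj.values.flatten.length + 1) hrel hd hfuel
  set layers := bfsLoop adj
    ((G.foldl (fun d p => d.insert p.1 false) PySem.Dict.empty).insert s true) [s] with hlay
  rw [h1]
  have hflat : s :: rest = layers.flatten := by simpa using h2
  -- the last element of the order and its label
  have hne : (s :: rest : List Int) ≠ [] := by simp
  have hlast2 : distF.getD ((s :: rest).getLast hne) 0 + 1 = (layers.length : Int) := by
    have := hlast ((s :: rest).getLast hne)
      (by rw [List.singleton_append, List.getLast?_eq_getLast hne]) (by simp)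
    simpa using this
  have hdep : PySem.List.pyGetD ([s] ++ rest) (-1) 0 = (s :: rest).getLast hne := by
    have : ([s] ++ rest : List Int) = s :: rest := by simp
    rw [this, PySem.List.pyGetD_neg_one (s :: rest) 0 hne]
  rw [hdep]
  have hLpos : 0 < layers.length := by
    have : (s : Int) ∈ layers.flatten := by rw [← hflat]; simp
    rcases List.mem_flatten.mp this with ⟨l, hl, _⟩
    refine List.length_pos_iff.mpr (fun hcon => ?_)
    rw [hcon] at hl
    simp at hl
  -- the range runs over exactly the layer indices
  rw [hlast2, PySem.List.pyRange_one]
  have htoNat : ((layers.length : Int) - 0).toNat = layers.length := by omega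
  rw [htoNat]
  apply List.ext_getElem
  · simp
  · intro i hi1 hi2
    simp only [List.getElem_map, List.getElem_range]
    have hi : i < layers.length := by simpa using hi2
    have := filter_label distF layers 0 i (by simpa using hlab) hi
    have hl : ([s] ++ rest : List Int) = layers.flatten := by simpa using h2
    rw [hl]
    simpa using this.symm
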